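-- pv_equiv track=rewrite | github.com/cullback/canopy | examples/catan/colonist/debug_topology.py | detect_orientation
-- ===== SOURCE A (Python) =====
-- LAND_HEXES = [
--     (0, -2),
--     (1, -2),
--     (2, -2),
--     (2, -1),
--     (2, 0),
--     (1, 1),
--     (0, 2),
--     (-1, 2),
--     (-2, 2),
--     (-2, 1),
--     (-2, 0),
--     (-1, -1),
--     (0, -1),
--     (1, -1),
--     (1, 0),
--     (0, 1),
--     (-1, 1),
--     (-1, 0),
--     (0, 0),
-- ]
--
-- TOKEN_SEQUENCE = [5, 2, 6, 3, 8, 10, 9, 12, 11, 4, 8, 10, 9, 4, 5, 6, 3, 11]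
--
-- def map_hex(q, r, rotation, reflect):
--     cq, cr, cs = q, r, -q - r
--     if reflect:
--         cr, cs = cs, cr
--     for _ in range(rotation):
--         cq, cr, cs = -cr, -cs, -cq
--     return (cq, cr)
--
-- def detect_orientation(tiles):
--     hex_to_land = {h: i for i, h in enumerate(LAND_HEXES)}
--     for reflect in [False, True]:
--         for rotation in range(6):
--             numbers_by_index = [None] * 19
--             land_count = 0
--             for t in tiles:
--                 mx, my = map_hex(t["x"], t["y"], rotation, reflect)
--                 idx = hex_to_land.get((mx, my))
--                 if idx is not None:
--                     land_count += 1
--                     if t["diceNumber"] > 0: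
--                         numbers_by_index[idx] = t["diceNumber"]
--             if land_count != 19:
--                 continue
--             nums = [n for n in numbers_by_index if n is not None]
--             if nums == TOKEN_SEQUENCE:
--                 return rotation, reflect
--     return 0, False
-- ===== SOURCE B (Python) =====
-- LAND_HEXES = [
--     (0, -2),
--     (1, -2),
--     (2, -2),
--     (2, -1),
--     (2, 0),
--     (1, 1),
--     (0, 2),
--     (-1, 2),
--     (-2, 2),
--     (-2, 1),
--     (-2, 0),
--     (-1, -1),
--     (0, -1),
--     (1, -1),
--     (1, 0),
--     (0, 1),
--     (-1, 1),
--     (-1, 0),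
--     (0, 0),
-- ]
--
-- TOKEN_SEQUENCE = [5, 2, 6, 3, 8, 10, 9, 12, 11, 4, 8, 10, 9, 4, 5, 6, 3, 11]
--
--
-- def _orient(q, r, rotation, reflect):
--     # closed-form axial-coordinate rotation (no loop), one case per rotation 0..5
--     s = -q - r
--     if reflect:
--         r, s = s, r
--     if rotation == 0:
--         return (q, r)
--     if rotation == 1:
--         return (-r, -s)
--     if rotation == 2:
--         return (s, q)
--     if rotation == 3:
--         return (-q, -r)
--     if rotation == 4:
--         return (r, s)
--     return (-s, -q)
--
--
-- def detect_orientation(tiles):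
--     hex_to_land = {h: i for i, h in enumerate(LAND_HEXES)}
--     orients = [(r, False) for r in range(6)] + [(r, True) for r in range(6)]
--     # one pass over the tiles, building all 12 candidate tables at once
--     states = [(o, [None] * 19, 0) for o in orients]
--     for t in tiles:
--         q, r, dn = t["x"], t["y"], t.get("diceNumber", 0)
--         new_states = []
--         for (o, nums, cnt) in states:
--             idx = hex_to_land.get(_orient(q, r, o[0], o[1]))
--             if idx is not None:
--                 cnt += 1
--                 if dn > 0:
--                     nums = list(nums)
--                     nums[idx] = dn
--             new_states.append((o, nums, cnt))
--         states = new_states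
--     # then a single checking pass over the 12 finished tables, in the original order
--     for (o, nums, cnt) in states:
--         if cnt == 19 and [n for n in nums if n is not None] == TOKEN_SEQUENCE:
--             return o
--     return 0, False
-- ===== Notes on version B (the rewrite author's own statement) =====
-- stated objective: alternative
-- what changed: B scans the tiles list once, updating all 12 orientation tables (numbers-by-index and land-count) in that single pass and then checking the 12 finished tables in A's original order, instead of A's 12 independent re-scans of the tiles; B also replaces map_hex's rotation loop by a closed-form 6-case rotation and reads a missing diceNumber as 0 via dict.get.
-- outside the precondition, e.g. on detect_orientation([{'x': 0, 'y': 0}]): A raises KeyError, B returns (0, False)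
import Mathlib
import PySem

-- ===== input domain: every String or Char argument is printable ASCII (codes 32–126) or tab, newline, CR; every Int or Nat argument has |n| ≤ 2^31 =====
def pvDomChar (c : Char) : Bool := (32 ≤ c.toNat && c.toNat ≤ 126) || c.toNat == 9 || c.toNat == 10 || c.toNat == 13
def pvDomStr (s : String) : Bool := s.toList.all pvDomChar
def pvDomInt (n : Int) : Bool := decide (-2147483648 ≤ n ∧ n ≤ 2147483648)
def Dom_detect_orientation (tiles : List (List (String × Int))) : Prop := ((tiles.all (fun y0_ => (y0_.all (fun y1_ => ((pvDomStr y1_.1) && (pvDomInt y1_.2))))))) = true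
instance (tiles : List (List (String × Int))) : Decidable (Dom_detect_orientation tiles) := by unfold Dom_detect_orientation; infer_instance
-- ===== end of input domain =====

-- B replaces the 12 independent re-scans of the tiles (one per orientation) by ONE pass over the
-- tiles that updates all 12 candidate tables at once, and replaces map_hex's rotation loop by a
-- closed-form 6-case rotation; same first-match answer (objective: alternative decomposition).

-- module-level constants shared by both programs
def LAND_HEXES : List (Int × Int) :=
  [(0, -2), (1, -2), (2, -2), (2, -1), (2, 0), (1, 1), (0, 2), (-1, 2), (-2, 2), (-2, 1),
   (-2, 0), (-1, -1), (0, -1), (1, -1), (1, 0), (0, 1), (-1, 1), (-1, 0), (0, 0)]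

def TOKEN_SEQUENCE : List Int := [5, 2, 6, 3, 8, 10, 9, 12, 11, 4, 8, 10, 9, 4, 5, 6, 3, 11]

-- t["k"] for a tile dict (total form; Pre_ requires the key to be present with unique keys)
def tileGet (t : List (String × Int)) (k : String) : Int := (PySem.Dict.mk t).getD k 0

-- {h: i for i, h in enumerate(LAND_HEXES)}
def hexToLand : PySem.Dict (Int × Int) Int :=
  (PySem.List.enumerate LAND_HEXES 0).foldl (fun d ih => d.insert ih.2 ih.1) PySem.Dict.empty

-- ===== PORT A =====
def map_hex (q r rotation : Int) (reflect : Bool) : Int × Int :=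
  let c : Int × Int × Int := (q, r, -q - r)
  let c := if reflect then (c.1, c.2.2, c.2.1) else c
  let c := (PySem.List.pyRange 0 rotation 1).foldl
    (fun (c : Int × Int × Int) _ => (-c.2.1, -c.2.2, -c.1)) c
  (c.1, c.2.1)

def detect_orientation (tiles : List (List (String × Int))) : Int × Bool :=
  match [false, true].findSome? (fun reflect =>
    (PySem.List.pyRange 0 6 1).findSome? (fun rotation =>
      let st := tiles.foldl (fun (st : List (Option Int) × Int) t =>
        let m := map_hex (tileGet t "x") (tileGet t "y") rotation reflect
        match hexToLand.get? m with
        | some idx =>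
            if tileGet t "diceNumber" > 0 then
              (PySem.List.pySetD st.1 idx (some (tileGet t "diceNumber")), st.2 + 1)
            else (st.1, st.2 + 1)
        | none => st) (List.replicate 19 none, 0)
      if st.2 ≠ 19 then none
      else if st.1.filterMap id = TOKEN_SEQUENCE then some (rotation, reflect) else none))
  with
  | some p => p
  | none => (0, false)

-- ===== PORT B =====
def applyOrient (q r rotation : Int) (reflect : Bool) : Int × Int :=
  let s := -q - r
  let (r, s) := if reflect then (s, r) else (r, s)
  if rotation = 0 then (q, r)
  else if rotation = 1 then (-r, -s)
  else if rotation = 2 then (s, q)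
  else if rotation = 3 then (-q, -r)
  else if rotation = 4 then (r, s)
  else (-s, -q)

def detect_orientation_alt (tiles : List (List (String × Int))) : Int × Bool :=
  let orients : List (Int × Bool) :=
    (PySem.List.pyRange 0 6 1).map (fun r => (r, false)) ++
    (PySem.List.pyRange 0 6 1).map (fun r => (r, true))
  let init := orients.map (fun o => (o, ((List.replicate 19 (none : Option Int)), (0 : Int))))
  let states := tiles.foldl (fun states t =>
    let q := tileGet t "x"
    let r := tileGet t "y"
    let dn := tileGet t "diceNumber"
    states.map (fun s =>
      match hexToLand.get? (applyOrient q r s.1.1 s.1.2) with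
      | some idx =>
          if dn > 0 then (s.1, (PySem.List.pySetD s.2.1 idx (some dn), s.2.2 + 1))
          else (s.1, (s.2.1, s.2.2 + 1))
      | none => s)) init
  match states.findSome? (fun s =>
      if s.2.2 = 19 ∧ s.2.1.filterMap id = TOKEN_SEQUENCE then some s.1 else none) with
  | some o => o
  | none => (0, false)

-- ===== PRECONDITION & SPEC =====
-- a tile lies on the board iff max(|x|, |y|, |x+y|) ≤ 2 (= membership in LAND_HEXES, invariant
-- under all 12 orientations); lookups read the LAST binding of a key, as a Python dict built from
-- the pairs would
def onBoard (t : List (String × Int)) : Prop :=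
  ((t.reverse.lookup "x").getD 0).natAbs ≤ 2 ∧ ((t.reverse.lookup "y").getD 0).natAbs ≤ 2 ∧
    ((t.reverse.lookup "x").getD 0 + (t.reverse.lookup "y").getD 0).natAbs ≤ 2

-- Pre_ excludes tiles missing the key "x" or "y" (both Pythons raise KeyError), on-board tiles
-- missing "diceNumber" (A raises KeyError; B returns, reading a missing dice number as 0), and
-- tiles whose association list repeats a key (a Python dict cannot: that corner is an artefact of
-- the encoding).
def Pre_detect_orientation (tiles : List (List (String × Int))) : Prop :=
  ∀ t ∈ tiles, (t.map Prod.fst).Nodup ∧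
    "x" ∈ t.map Prod.fst ∧ "y" ∈ t.map Prod.fst ∧
    (onBoard t → "diceNumber" ∈ t.map Prod.fst)
instance (tiles : List (List (String × Int))) : Decidable (Pre_detect_orientation tiles) := by
  unfold Pre_detect_orientation onBoard; infer_instance

def pvWitness_detect_orientation : (List (List (String × Int))) :=
  [[("x", 0), ("y", 0), ("diceNumber", 5)], [("x", 9), ("y", -7), ("diceNumber", 0)]]


def Spec_detect_orientation (tiles : List (List (String × Int))) (out : Int × Bool) : Prop := out = detect_orientation_alt tiles
instance (tiles : List (List (String × Int))) (out : Int × Bool) : Decidable (Spec_detect_orientation tiles out) := by unfold Spec_detect_orientation; infer_instance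

-- ===== CLAIM (what is proved, stated in full; the proofs are below) =====
def Claim_equal_detect_orientation : Prop := ∀ (tiles : List (List (String × Int))), Dom_detect_orientation tiles → Pre_detect_orientation tiles → Spec_detect_orientation tiles (detect_orientation tiles)


-- ===== LEMMAS AND PROOFS =====

-- one pass building all tables at once = each table built by its own pass
theorem foldl_map_swap {α σ : Type} (f : α → σ → σ) (ts : List α) (l : List σ) :
    ts.foldl (fun l t => l.map (f t)) l = l.map (fun s => ts.foldl (fun s t => f t s) s) := by
  induction ts generalizing l with
  | nil => simp
  | cons t ts ih => simp [ih, List.map_map, Function.comp]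

-- a fold that never touches the first component of its state
theorem foldl_fst_fixed {α β σ : Type} (g : β → σ → α → σ) (ts : List α) (o : β) (s : σ) :
    ts.foldl (fun (p : β × σ) t => (p.1, g p.1 p.2 t)) (o, s) = (o, ts.foldl (g o) s) := by
  induction ts generalizing s with
  | nil => rfl
  | cons t ts ih => exact ih (g o s t)

-- the closed-form rotation agrees with the rotation loop on rotations 0..5
theorem map_hex_eq (q r rotation : Int) (reflect : Bool)
    (h0 : 0 ≤ rotation) (h6 : rotation < 6) :
    map_hex q r rotation reflect = applyOrient q r rotation reflect := by
  interval_cases rotation <;> cases reflect <;>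
    simp [map_hex, applyOrient, show PySem.List.pyRange 0 1 1 = [0] from by decide,
      show PySem.List.pyRange 0 2 1 = [0, 1] from by decide,
      show PySem.List.pyRange 0 3 1 = [0, 1, 2] from by decide,
      show PySem.List.pyRange 0 4 1 = [0, 1, 2, 3] from by decide,
      show PySem.List.pyRange 0 5 1 = [0, 1, 2, 3, 4] from by decide] <;> try ring

-- proof-side helpers: the per-orientation tile step (B's closed-form rotation), the initial
-- table, the per-orientation check, and the 12 orientations in A's scanning order
def step (o : Int × Bool) (st : List (Option Int) × Int) (t : List (String × Int)) :
    List (Option Int) × Int :=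
  match hexToLand.get? (applyOrient (tileGet t "x") (tileGet t "y") o.1 o.2) with
  | some idx =>
      if tileGet t "diceNumber" > 0 then
        (PySem.List.pySetD st.1 idx (some (tileGet t "diceNumber")), st.2 + 1)
      else (st.1, st.2 + 1)
  | none => st

def init19 : List (Option Int) × Int := (List.replicate 19 none, 0)

def runO (tiles : List (List (String × Int))) (o : Int × Bool) : Option (Int × Bool) :=
  let st := tiles.foldl (step o) init19
  if st.2 = 19 ∧ st.1.filterMap id = TOKEN_SEQUENCE then some o else none

def L12 : List (Int × Bool) :=
  [(0, false), (1, false), (2, false), (3, false), (4, false), (5, false),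
   (0, true), (1, true), (2, true), (3, true), (4, true), (5, true)]

theorem states_eq (tiles : List (List (String × Int))) :
    tiles.foldl (fun states t =>
      states.map (fun (s : (Int × Bool) × (List (Option Int) × Int)) =>
        match hexToLand.get? (applyOrient (tileGet t "x") (tileGet t "y") s.1.1 s.1.2) with
        | some idx =>
            if tileGet t "diceNumber" > 0 then
              (s.1, (PySem.List.pySetD s.2.1 idx (some (tileGet t "diceNumber")), s.2.2 + 1))
            else (s.1, (s.2.1, s.2.2 + 1))
        | none => s)) (L12.map (fun o => (o, init19)))
    = L12.map (fun o => (o, tiles.foldl (step o) init19)) := by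
  rw [foldl_map_swap]
  rw [List.map_map]
  apply List.map_congr_left
  intro o _
  have hb : (fun (s : (Int × Bool) × (List (Option Int) × Int)) (t : List (String × Int)) =>
      (match hexToLand.get? (applyOrient (tileGet t "x") (tileGet t "y") s.1.1 s.1.2) with
        | some idx =>
            if tileGet t "diceNumber" > 0 then
              (s.1, (PySem.List.pySetD s.2.1 idx (some (tileGet t "diceNumber")), s.2.2 + 1))
            else (s.1, (s.2.1, s.2.2 + 1))
        | none => s))
      = (fun (s : (Int × Bool) × (List (Option Int) × Int)) t => (s.1, step s.1 s.2 t)) := by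
    funext s t
    unfold step
    rcases h : hexToLand.get? (applyOrient (tileGet t "x") (tileGet t "y") s.1.1 s.1.2) with _ | idx <;>
      simp <;> split_ifs <;> rfl
  simp only [Function.comp_apply, hb]
  exact foldl_fst_fixed (fun o st t => step o st t) tiles o init19

theorem Balt_eq (tiles : List (List (String × Int))) :
    detect_orientation_alt tiles =
      match L12.findSome? (runO tiles) with
      | some o => o
      | none => (0, false) := by
  have hor : ((PySem.List.pyRange 0 6 1).map (fun r => (r, false)) ++
      (PySem.List.pyRange 0 6 1).map (fun r => (r, true))) = L12 := by decide
  simp only [detect_orientation_alt, hor]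
  rw [show (List.replicate 19 (none : Option Int), (0 : Int)) = init19 from rfl]
  rw [states_eq, List.findSome?_map]
  have hc : ((fun (s : (Int × Bool) × (List (Option Int) × Int)) =>
      if s.2.2 = 19 ∧ s.2.1.filterMap id = TOKEN_SEQUENCE then some s.1 else none) ∘
      (fun o => (o, tiles.foldl (step o) init19))) = runO tiles := by
    funext o
    simp [runO, Function.comp]
  rw [hc]

theorem if_not_if_eq_if_and {α : Type} (c d : Prop) [Decidable c] [Decidable d] (v : α) :
    (if ¬c then none else if d then some v else none) = (if c ∧ d then some v else none) := by
  by_cases hc : c <;> by_cases hd : d <;> simp [hc, hd]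

theorem checkA_eq (tiles : List (List (String × Int))) (rot : Int) (refl : Bool)
    (h0 : 0 ≤ rot) (h6 : rot < 6) :
    (let st := tiles.foldl (fun (st : List (Option Int) × Int) t =>
        match hexToLand.get? (map_hex (tileGet t "x") (tileGet t "y") rot refl) with
        | some idx =>
            if tileGet t "diceNumber" > 0 then
              (PySem.List.pySetD st.1 idx (some (tileGet t "diceNumber")), st.2 + 1)
            else (st.1, st.2 + 1)
        | none => st) (List.replicate 19 none, 0)
      if st.2 ≠ 19 then none
      else if st.1.filterMap id = TOKEN_SEQUENCE then some (rot, refl) else none)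
    = runO tiles (rot, refl) := by
  have hf : (fun (st : List (Option Int) × Int) t =>
      match hexToLand.get? (map_hex (tileGet t "x") (tileGet t "y") rot refl) with
      | some idx =>
          if tileGet t "diceNumber" > 0 then
            (PySem.List.pySetD st.1 idx (some (tileGet t "diceNumber")), st.2 + 1)
          else (st.1, st.2 + 1)
      | none => st) = step (rot, refl) := by
    funext st t
    unfold step
    rw [map_hex_eq _ _ _ _ h0 h6]
  simp only [hf]
  unfold runO init19
  exact if_not_if_eq_if_and _ _ _

theorem findSome?_congr_mem {α β : Type} (f g : α → Option β) (l : List α)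
    (h : ∀ x ∈ l, f x = g x) : l.findSome? f = l.findSome? g := by
  induction l with
  | nil => rfl
  | cons a l ih =>
      rw [List.findSome?_cons, List.findSome?_cons, h a (List.mem_cons_self),
        ih (fun x hx => h x (List.mem_cons_of_mem a hx))]

theorem A_eq (tiles : List (List (String × Int))) :
    detect_orientation tiles =
      match L12.findSome? (runO tiles) with
      | some o => o
      | none => (0, false) := by
  have hr : PySem.List.pyRange 0 6 1 = [0, 1, 2, 3, 4, 5] := by decide
  have hF : ∀ reflect : Bool,
      (PySem.List.pyRange 0 6 1).findSome? (fun rotation =>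
        let st := tiles.foldl (fun (st : List (Option Int) × Int) t =>
          match hexToLand.get? (map_hex (tileGet t "x") (tileGet t "y") rotation reflect) with
          | some idx =>
              if tileGet t "diceNumber" > 0 then
                (PySem.List.pySetD st.1 idx (some (tileGet t "diceNumber")), st.2 + 1)
              else (st.1, st.2 + 1)
          | none => st) (List.replicate 19 none, 0)
        if st.2 ≠ 19 then none
        else if st.1.filterMap id = TOKEN_SEQUENCE then some (rotation, reflect) else none)
      = (([0, 1, 2, 3, 4, 5] : List Int).map (fun r => (r, reflect))).findSome? (runO tiles) := by
    intro reflect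
    rw [hr, List.findSome?_map]
    exact findSome?_congr_mem _ _ _ (fun rot hrot => by
      have h06 : 0 ≤ rot ∧ rot < 6 := by
        simp only [List.mem_cons, List.not_mem_nil, or_false] at hrot
        rcases hrot with h | h | h | h | h | h <;> omega
      exact checkA_eq tiles rot reflect h06.1 h06.2)
  have hsplit : L12 = ([0, 1, 2, 3, 4, 5] : List Int).map (fun r => (r, false)) ++
      ([0, 1, 2, 3, 4, 5] : List Int).map (fun r => (r, true)) := by decide
  simp only [detect_orientation, hF]
  rw [hsplit, List.findSome?_append, List.findSome?_cons, List.findSome?_cons,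
    List.findSome?_nil]
  cases (([0, 1, 2, 3, 4, 5] : List Int).map (fun r => (r, false))).findSome? (runO tiles) <;>
    cases (([0, 1, 2, 3, 4, 5] : List Int).map (fun r => (r, true))).findSome? (runO tiles) <;>
    rfl

-- ===== VERDICT (by name: the statement is the Claim_ definition above) =====
theorem detect_orientation_spec : Claim_equal_detect_orientation := by
  intro tiles _ _
  unfold Spec_detect_orientation
  rw [A_eq, Balt_eq]
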